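-- pv_equiv track=rewrite | github.com/waseembaig/Ixload_tencent | IxUtils.py | get_timeline_args
-- ===== SOURCE A (Python) =====
-- def get_timeline_args(value_dict):
--     '''
--         get_timeline_args will return timeline argument.
--     '''
--     ret_dict = {}
--     activity_list = ["rampUpType", "rampUpValue", "offlineTime", "rampDownTime", "standbyTime", "rampDownValue", "rampUpInterval", "iterations",
--                      "rampUpTime", "sustainTime", "timelineType", "name"]
--     for key in value_dict:
--         if activity_list.count(key):
--             ret_dict[key] = value_dict[key]
--     for key in activity_list:
--         if key in value_dict.keys():
--             value_dict.pop(key)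
--     return (ret_dict, value_dict)
-- ===== SOURCE B (Python) =====
-- # Single-pass partition of value_dict into timeline args and the rest
-- # (A's two loops merged into one); value_dict is still mutated in place.
-- ACTIVITY_KEYS = frozenset(["rampUpType", "rampUpValue", "offlineTime", "rampDownTime", "standbyTime", "rampDownValue", "rampUpInterval", "iterations",
--                            "rampUpTime", "sustainTime", "timelineType", "name"])
--
-- def get_timeline_args(value_dict):
--     ret_dict = {}
--     rest = {}
--     for key, value in value_dict.items():
--         (ret_dict if key in ACTIVITY_KEYS else rest)[key] = value
--     value_dict.clear()
--     value_dict.update(rest)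
--     return (ret_dict, value_dict)
-- ===== Notes on version B (the rewrite author's own statement) =====
-- stated objective: simpler
-- what changed: A's two passes (one over value_dict keys building ret_dict by repeated activity_list.count scans, one over activity_list popping keys) are replaced by a single pass over value_dict.items() that partitions each entry by frozenset membership into ret_dict or the remainder, which is then written back into value_dict in place.
import Mathlib
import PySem

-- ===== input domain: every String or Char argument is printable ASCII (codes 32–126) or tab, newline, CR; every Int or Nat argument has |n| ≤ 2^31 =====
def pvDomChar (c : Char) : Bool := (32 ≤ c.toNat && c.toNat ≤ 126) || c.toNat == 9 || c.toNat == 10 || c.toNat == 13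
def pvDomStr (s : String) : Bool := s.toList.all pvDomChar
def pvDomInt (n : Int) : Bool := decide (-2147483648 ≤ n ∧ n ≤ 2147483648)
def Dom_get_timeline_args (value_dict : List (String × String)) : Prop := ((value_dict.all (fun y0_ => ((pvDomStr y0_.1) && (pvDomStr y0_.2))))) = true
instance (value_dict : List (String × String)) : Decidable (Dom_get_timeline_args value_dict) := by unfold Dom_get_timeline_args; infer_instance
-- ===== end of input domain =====

-- B partitions value_dict in ONE pass (membership in a fixed key set) instead of A's two passes;
-- both mutate value_dict in place in Python; the equivalence proved is about the returned pair.


-- ===== PORT A =====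
def pvActivityList : List String :=
  ["rampUpType", "rampUpValue", "offlineTime", "rampDownTime", "standbyTime", "rampDownValue", "rampUpInterval", "iterations",
   "rampUpTime", "sustainTime", "timelineType", "name"]

-- literal port of A: first loop over value_dict's keys builds ret_dict (value_dict[key] is a
-- first-match lookup; the .getD "" default is unreachable since key comes from value_dict);
-- second loop over activity_list pops present keys from value_dict.
def get_timeline_args (value_dict : List (String × String)) : (List (String × String)) × (List (String × String)) :=
  let ret_dict := (value_dict.map Prod.fst).foldl
    (fun rd key => if pvActivityList.count key ≠ 0
                   then rd.insert key (((PySem.Dict.mk value_dict).get? key).getD "")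
                   else rd)
    PySem.Dict.empty
  let vd := pvActivityList.foldl
    (fun d key => if d.contains key then d.erase key else d)
    (PySem.Dict.mk value_dict)
  (ret_dict.items, vd.items)

-- ===== PORT B =====
def pvActivityKeys : PySem.Set String :=
  PySem.Set.ofList ["rampUpType", "rampUpValue", "offlineTime", "rampDownTime", "standbyTime", "rampDownValue", "rampUpInterval", "iterations",
                    "rampUpTime", "sustainTime", "timelineType", "name"]

-- port of B: one fold over the items, partitioning each entry into (ret_dict, rest)
def get_timeline_args_alt (value_dict : List (String × String)) : (List (String × String)) × (List (String × String)) :=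
  value_dict.foldl
    (fun acc p => if pvActivityKeys.contains p.1 then (acc.1 ++ [p], acc.2) else (acc.1, acc.2 ++ [p]))
    ([], [])

-- ===== PRECONDITION & SPEC =====
-- value_dict is the item list of a Python dict, so its keys are distinct; Pre_ states exactly
-- that (it excludes no input the Python function can actually receive).
def Pre_get_timeline_args (value_dict : List (String × String)) : Prop :=
  (value_dict.map Prod.fst).Nodup
instance (value_dict : List (String × String)) : Decidable (Pre_get_timeline_args value_dict) := by unfold Pre_get_timeline_args; infer_instance

def pvWitness_get_timeline_args : (List (String × String)) := [("name", "t1"), ("foo", "1")]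

def Spec_get_timeline_args (value_dict : List (String × String)) (out : (List (String × String)) × (List (String × String))) : Prop := out = get_timeline_args_alt value_dict
instance (value_dict : List (String × String)) (out : (List (String × String)) × (List (String × String))) : Decidable (Spec_get_timeline_args value_dict out) := by unfold Spec_get_timeline_args; infer_instance

-- ===== CLAIM (what is proved, stated in full; the proofs are below) =====
def Claim_equal_get_timeline_args : Prop := ∀ (value_dict : List (String × String)), Dom_get_timeline_args value_dict → Pre_get_timeline_args value_dict → Spec_get_timeline_args value_dict (get_timeline_args value_dict)

-- ===== LEMMAS AND PROOFS =====

-- the two spellings of "key is a timeline key" agree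
theorem pred_eq (k : String) :
    (decide (pvActivityList.count k ≠ 0)) = pvActivityKeys.contains k := by
  have h : pvActivityKeys = pvActivityList := by decide
  rw [h]
  by_cases hm : k ∈ pvActivityList <;>
    simp [hm, List.count_eq_zero]

-- B's fold is a partition: activity entries left, the rest right
theorem part_loop (l a b : List (String × String)) :
    l.foldl (fun acc p => if pvActivityKeys.contains p.1 then (acc.1 ++ [p], acc.2) else (acc.1, acc.2 ++ [p])) (a, b)
      = (a ++ l.filter (fun p => pvActivityKeys.contains p.1),
         b ++ l.filter (fun p => !pvActivityKeys.contains p.1)) := by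
  induction l generalizing a b with
  | nil => simp
  | cons x t ih =>
    by_cases h : pvActivityKeys.contains x.1 = true
    · simp only [List.foldl_cons, List.filter_cons, h, if_true, Bool.not_true, Bool.false_eq_true,
        if_false, ih]
      simp
    · have h' : pvActivityKeys.contains x.1 = false := by simpa using h
      simp only [List.foldl_cons, List.filter_cons, h', Bool.not_false, if_true, Bool.false_eq_true,
        if_false, ih]
      simp

theorem erase_of_not_contains (d : PySem.Dict String String) (k : String)
    (h : d.contains k = false) : d.erase k = d := by
  apply PySem.Dict.ext
  simp only [PySem.Dict.erase]
  apply List.filter_eq_self.mpr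
  intro p hp
  simp only [PySem.Dict.contains, List.any_eq_false] at h
  simpa using h p hp

-- A's second loop filters out every activity key (the contains-guard is harmless:
-- erasing an absent key is the identity)
theorem a_second (l : List (String × String)) (ks : List String) :
    (ks.foldl (fun d key => if d.contains key then d.erase key else d) (PySem.Dict.mk l)).items
      = l.filter (fun p => decide (p.1 ∉ ks)) := by
  induction ks generalizing l with
  | nil => simp
  | cons k t ih =>
    simp only [List.foldl_cons]
    have hstep : (if (PySem.Dict.mk l).contains k = true then (PySem.Dict.mk l).erase k else PySem.Dict.mk l)
        = PySem.Dict.mk (l.filter (fun p => !(p.1 == k))) := by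
      by_cases h : (PySem.Dict.mk l).contains k = true
      · rw [if_pos h]; rfl
      · rw [if_neg h]
        simp only [Bool.not_eq_true] at h
        rw [← erase_of_not_contains (PySem.Dict.mk l) k h]; rfl
    rw [hstep, ih, List.filter_filter]
    apply List.filter_congr
    intro p _
    by_cases hk : p.1 = k
    · simp [hk]
    · have hb : (p.1 == k) = false := by simpa using hk
      simp [hb, hk, List.mem_cons]

-- A's first loop builds the filter of l keeping activity entries (keys distinct)
theorem a_first (l : List (String × String)) (h : (l.map Prod.fst).Nodup) :
    ((l.map Prod.fst).foldl
      (fun rd key => if pvActivityList.count key ≠ 0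
                     then rd.insert key (((PySem.Dict.mk l).get? key).getD "")
                     else rd)
      PySem.Dict.empty).items
      = l.filter (fun p => pvActivityKeys.contains p.1) := by
  rw [PySem.List.foldl_ite_eq_foldl_filter]
  have hkeys : ((l.map Prod.fst).filter (fun x => decide (pvActivityList.count x ≠ 0)))
      = (l.filter (fun p => pvActivityKeys.contains p.1)).map Prod.fst := by
    rw [List.filter_map]
    congr 1
    apply List.filter_congr
    intro p _
    simpa using pred_eq p.1
  rw [hkeys]
  have hnodupl : (PySem.Dict.mk l).keys.Nodup := by simpa [PySem.Dict.keys] using h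
  have hfresh := PySem.Dict.items_foldl_insert_fresh
    (l := (l.filter (fun p => pvActivityKeys.contains p.1)).map Prod.fst)
    (k := fun x => x)
    (v := fun key => ((PySem.Dict.mk l).get? key).getD "")
    (d := (PySem.Dict.empty : PySem.Dict String String))
    (by intro a _; simp [PySem.Dict.contains, PySem.Dict.empty])
    (by simpa using List.Nodup.sublist ((List.filter_sublist).map Prod.fst) h)
  rw [hfresh]
  simp only [PySem.Dict.empty, List.nil_append, List.map_map]
  rw [List.map_congr_left (g := fun p => p)]
  · simp
  · intro p hp
    have hpl : p ∈ l := List.mem_of_mem_filter hp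
    have : (PySem.Dict.mk l).get? p.1 = some p.2 :=
      PySem.Dict.get?_of_mem_items (PySem.Dict.mk l) (by simpa [PySem.Dict.items] using hpl) hnodupl
    simp [this]

-- ===== VERDICT (by name: the statement is the Claim_ definition above) =====
theorem get_timeline_args_spec : Claim_equal_get_timeline_args := by
  intro l _ hpre
  unfold Spec_get_timeline_args get_timeline_args get_timeline_args_alt
  rw [part_loop]
  refine Prod.ext ?_ ?_
  · simpa using a_first l hpre
  · simp only [List.nil_append]
    rw [a_second]
    apply List.filter_congr
    intro p _
    rw [← pred_eq p.1]
    have hcnt : pvActivityList.count p.1 ≠ 0 ↔ p.1 ∈ pvActivityList := by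
      simp [List.count_eq_zero]
    by_cases hm : p.1 ∈ pvActivityList <;> simp [hm, hcnt]
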